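-- pv_equiv track=rewrite | github.com/jcarlosroldan/tuenti-challenge | 9/3/solve.py | solve
-- ===== SOURCE A (Python) =====
-- def solve(w, h, folds, punches):
-- 	res = punches
-- 	for fold in folds:
-- 		if fold == 'T':
-- 			punches = [(x, h - y - 1) for x, y in punches] + [(x, h + y) for x, y in punches]
-- 			h *= 2
-- 		elif fold == 'B':
-- 			punches = punches + [(x, 2 * h - y - 1) for x, y in punches]
-- 			h *= 2
-- 		elif fold == 'L':
-- 			punches = [(w - x - 1, y) for x, y in punches] + [(w + x, y) for x, y in punches]
-- 			w *= 2
-- 		elif fold == 'R':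
-- 			punches = punches + [(2 * w - x - 1, y) for x, y in punches]
-- 			w *= 2
-- 	return '\n' + '\n'.join('%s %s' % punch for punch in sorted(punches))
-- ===== SOURCE B (Python) =====
-- def solve(w, h, folds, punches):
-- 	# Factorize the 2-D unfolding into two 1-D expansions computed ONCE, symbolically:
-- 	# each unfolded coordinate is s*x + c, so we track (sign, offset) pairs through the
-- 	# folds (x-list driven by L/R, y-list driven by T/B), then apply them to every punch
-- 	# and take the Cartesian product.  Sorting makes collection order irrelevant.
-- 	sx, ws = [(1, 0)], w
-- 	sy, hs = [(1, 0)], h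
-- 	for f in folds:
-- 		if f == 'L':
-- 			sx = [(-s, ws - c - 1) for s, c in sx] + [(s, ws + c) for s, c in sx]
-- 			ws *= 2
-- 		elif f == 'R':
-- 			sx = sx + [(-s, 2 * ws - c - 1) for s, c in sx]
-- 			ws *= 2
-- 		elif f == 'T':
-- 			sy = [(-s, hs - c - 1) for s, c in sy] + [(s, hs + c) for s, c in sy]
-- 			hs *= 2
-- 		elif f == 'B':
-- 			sy = sy + [(-s, 2 * hs - c - 1) for s, c in sy]
-- 			hs *= 2
-- 	pairs = [(sa * x + ca, sb * y + cb) for x, y in punches for sa, ca in sx for sb, cb in sy]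
-- 	return '\n' + '\n'.join('%s %s' % p for p in sorted(pairs))
-- ===== Notes on version B (the rewrite author's own statement) =====
-- stated objective: alternative
-- what changed: Instead of repeatedly doubling one global 2-D list of punch points per fold, B computes two symbolic 1-D expansions once - (sign, offset) pairs, the x-list driven by L/R folds and the y-list by T/B folds - and applies each pair to every punch, taking the Cartesian product; the sorted output is identical.
import Mathlib
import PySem

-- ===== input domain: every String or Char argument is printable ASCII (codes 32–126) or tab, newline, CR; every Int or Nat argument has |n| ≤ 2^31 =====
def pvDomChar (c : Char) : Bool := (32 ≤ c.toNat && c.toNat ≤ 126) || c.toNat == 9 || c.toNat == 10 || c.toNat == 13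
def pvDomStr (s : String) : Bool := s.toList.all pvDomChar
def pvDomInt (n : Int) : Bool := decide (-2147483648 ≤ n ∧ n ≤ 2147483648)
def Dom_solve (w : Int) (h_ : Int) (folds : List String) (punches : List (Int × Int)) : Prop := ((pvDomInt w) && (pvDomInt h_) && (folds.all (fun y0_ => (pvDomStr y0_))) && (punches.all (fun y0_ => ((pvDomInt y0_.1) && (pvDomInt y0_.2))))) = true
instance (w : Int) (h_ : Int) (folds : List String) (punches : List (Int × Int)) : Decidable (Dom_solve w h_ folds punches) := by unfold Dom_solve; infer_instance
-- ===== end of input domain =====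

-- B replaces A's per-fold doubling of one 2-D point list by two symbolic 1-D
-- expansions computed once — (sign, offset) pairs, x driven by L/R folds, y by
-- T/B folds — applied to each punch and combined as a Cartesian product.

-- ===== PORT A =====
-- one fold step of A's loop; state = (w, h, punches)
def foldStepA (st : Int × Int × List (Int × Int)) (fold : String) : Int × Int × List (Int × Int) :=
  let w := st.1; let h := st.2.1; let punches := st.2.2
  if fold = "T" then (w, h * 2, punches.map (fun p => (p.1, h - p.2 - 1)) ++ punches.map (fun p => (p.1, h + p.2)))
  else if fold = "B" then (w, h * 2, punches ++ punches.map (fun p => (p.1, 2 * h - p.2 - 1)))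
  else if fold = "L" then (w * 2, h, punches.map (fun p => (w - p.1 - 1, p.2)) ++ punches.map (fun p => (w + p.1, p.2)))
  else if fold = "R" then (w * 2, h, punches ++ punches.map (fun p => (2 * w - p.1 - 1, p.2)))
  else st

-- '%s %s' % (x, y)
def pvFmt (p : Int × Int) : String := PySem.Int.toStr p.1 ++ " " ++ PySem.Int.toStr p.2

def solve (w : Int) (h_ : Int) (folds : List String) (punches : List (Int × Int)) : String :=
  let st := folds.foldl foldStepA (w, h_, punches)
  "\n" ++ PySem.Str.join "\n" ((PySem.List.sorted2 st.2.2 Prod.fst Prod.snd false).map pvFmt)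

-- ===== PORT B =====
-- one fold step of B's loop over symbolic (sign, offset) pairs; state = (sx, ws, sy, hs)
def foldStepB (st : List (Int × Int) × Int × List (Int × Int) × Int) (f : String) : List (Int × Int) × Int × List (Int × Int) × Int :=
  let sx := st.1; let ws := st.2.1; let sy := st.2.2.1; let hs := st.2.2.2
  if f = "L" then (sx.map (fun p => (-p.1, ws - p.2 - 1)) ++ sx.map (fun p => (p.1, ws + p.2)), ws * 2, sy, hs)
  else if f = "R" then (sx ++ sx.map (fun p => (-p.1, 2 * ws - p.2 - 1)), ws * 2, sy, hs)
  else if f = "T" then (sx, ws, sy.map (fun p => (-p.1, hs - p.2 - 1)) ++ sy.map (fun p => (p.1, hs + p.2)), hs * 2)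
  else if f = "B" then (sx, ws, sy ++ sy.map (fun p => (-p.1, 2 * hs - p.2 - 1)), hs * 2)
  else st

def solve_alt (w : Int) (h_ : Int) (folds : List String) (punches : List (Int × Int)) : String :=
  let st := folds.foldl foldStepB ([(1, 0)], w, [(1, 0)], h_)
  let pairs := punches.flatMap (fun q => st.1.flatMap (fun a => st.2.2.1.map (fun b => (a.1 * q.1 + a.2, b.1 * q.2 + b.2))))
  "\n" ++ PySem.Str.join "\n" ((PySem.List.sorted2 pairs Prod.fst Prod.snd false).map pvFmt)

-- ===== PRECONDITION & SPEC =====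
def Spec_solve (w : Int) (h_ : Int) (folds : List String) (punches : List (Int × Int)) (out : String) : Prop := out = solve_alt w h_ folds punches
instance (w : Int) (h_ : Int) (folds : List String) (punches : List (Int × Int)) (out : String) : Decidable (Spec_solve w h_ folds punches out) := by unfold Spec_solve; infer_instance

-- ===== CLAIM (what is proved, stated in full; the proofs are below) =====
def Claim_equal_solve : Prop := ∀ (w : Int) (h_ : Int) (folds : List String) (punches : List (Int × Int)), Dom_solve w h_ folds punches → Spec_solve w h_ folds punches (solve w h_ folds punches)

-- ===== LEMMAS AND PROOFS =====

-- proof-only: CONCRETE 1-D expansion step (B's symbolic step applied to actual coordinates)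
def oneDStep (st : List Int × Int × List Int × Int) (f : String) : List Int × Int × List Int × Int :=
  let xs := st.1; let ws := st.2.1; let ys := st.2.2.1; let hs := st.2.2.2
  if f = "L" then (xs.map (fun t => ws - t - 1) ++ xs.map (fun t => ws + t), ws * 2, ys, hs)
  else if f = "R" then (xs ++ xs.map (fun t => 2 * ws - t - 1), ws * 2, ys, hs)
  else if f = "T" then (xs, ws, ys.map (fun t => hs - t - 1) ++ ys.map (fun t => hs + t), hs * 2)
  else if f = "B" then (xs, ws, ys ++ ys.map (fun t => 2 * hs - t - 1), hs * 2)
  else st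

-- evaluate a symbolic (sign, offset) pair at a coordinate
def evalS (x : Int) (p : Int × Int) : Int := p.1 * x + p.2

-- Cartesian product of two 1-D coordinate lists
def pvProd (xs ys : List Int) : List (Int × Int) := xs.flatMap (fun a => ys.map (fun b => (a, b)))

theorem pvProd_append_left (a b ys : List Int) : pvProd (a ++ b) ys = pvProd a ys ++ pvProd b ys := by
  simp [pvProd]

theorem perm_middle_swap {α : Type} (A B C D : List α) : ((A ++ B) ++ (C ++ D)).Perm ((A ++ C) ++ (B ++ D)) := by
  have h : (B ++ (C ++ D)).Perm (C ++ (B ++ D)) := by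
    have h1 : ((B ++ C) ++ D).Perm ((C ++ B) ++ D) := (List.perm_append_comm).append_right D
    simpa [List.append_assoc] using h1
  have h2 := h.append_left A
  simpa [List.append_assoc] using h2

theorem pvProd_append_right_perm (xs a b : List Int) : (pvProd xs (a ++ b)).Perm (pvProd xs a ++ pvProd xs b) := by
  induction xs with
  | nil => simp [pvProd]
  | cons x xs ih =>
    have h1 : pvProd (x :: xs) (a ++ b) = (a.map (fun t => (x, t)) ++ b.map (fun t => (x, t))) ++ pvProd xs (a ++ b) := by
      simp [pvProd]
    have h2 : pvProd (x :: xs) a ++ pvProd (x :: xs) b = (a.map (fun t => (x, t)) ++ pvProd xs a) ++ (b.map (fun t => (x, t)) ++ pvProd xs b) := by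
      simp [pvProd]
    rw [h1, h2]
    exact (ih.append_left _).trans (perm_middle_swap _ _ _ _)

theorem pvProd_map_snd (xs ys : List Int) (f : Int → Int) :
    (pvProd xs ys).map (fun p => (p.1, f p.2)) = pvProd xs (ys.map f) := by
  simp [pvProd, List.map_flatMap, List.map_map, Function.comp_def]

theorem pvProd_map_fst (xs ys : List Int) (g : Int → Int) :
    (pvProd xs ys).map (fun p => (g p.1, p.2)) = pvProd (xs.map g) ys := by
  simp [pvProd, List.map_flatMap, List.flatMap_map, List.map_map, Function.comp_def]

-- A's fold loop sends permuted punch lists to permuted punch lists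
theorem stepA_perm (folds : List String) : ∀ (w h : Int) (P Q : List (Int × Int)), P.Perm Q →
    ((folds.foldl foldStepA (w, h, P)).2.2).Perm ((folds.foldl foldStepA (w, h, Q)).2.2) := by
  induction folds with
  | nil => intro w h P Q hp; exact hp
  | cons f rest ih =>
    intro w h P Q hp
    simp only [List.foldl_cons, foldStepA]
    split_ifs
    · exact ih _ _ _ _ ((hp.map _).append (hp.map _))
    · exact ih _ _ _ _ (hp.append (hp.map _))
    · exact ih _ _ _ _ ((hp.map _).append (hp.map _))
    · exact ih _ _ _ _ (hp.append (hp.map _))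
    · exact ih _ _ _ _ hp

-- A's fold loop distributes over append, up to permutation
theorem stepA_append_perm (folds : List String) : ∀ (w h : Int) (P Q : List (Int × Int)),
    ((folds.foldl foldStepA (w, h, P ++ Q)).2.2).Perm
      ((folds.foldl foldStepA (w, h, P)).2.2 ++ (folds.foldl foldStepA (w, h, Q)).2.2) := by
  induction folds with
  | nil => intro w h P Q; exact List.Perm.refl _
  | cons f rest ih =>
    intro w h P Q
    simp only [List.foldl_cons, foldStepA]
    split_ifs
    · refine (stepA_perm rest _ _ _ _ ?_).trans (ih _ _ _ _)
      simp only [List.map_append]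
      exact perm_middle_swap _ _ _ _
    · refine (stepA_perm rest _ _ _ _ ?_).trans (ih _ _ _ _)
      simp only [List.map_append]
      exact perm_middle_swap _ _ _ _
    · refine (stepA_perm rest _ _ _ _ ?_).trans (ih _ _ _ _)
      simp only [List.map_append]
      exact perm_middle_swap _ _ _ _
    · refine (stepA_perm rest _ _ _ _ ?_).trans (ih _ _ _ _)
      simp only [List.map_append]
      exact perm_middle_swap _ _ _ _
    · exact ih _ _ _ _

-- the key correspondence: A's loop on a product list tracks the two concrete 1-D loops
theorem stepA_prod (folds : List String) : ∀ (xs : List Int) (w : Int) (ys : List Int) (h : Int),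
    ((folds.foldl foldStepA (w, h, pvProd xs ys)).2.2).Perm
      (pvProd (folds.foldl oneDStep (xs, w, ys, h)).1 (folds.foldl oneDStep (xs, w, ys, h)).2.2.1) := by
  induction folds with
  | nil => intro xs w ys h; exact List.Perm.refl _
  | cons f rest ih =>
    intro xs w ys h
    simp only [List.foldl_cons, foldStepA, oneDStep]
    by_cases hT : f = "T"
    · simp only [hT]
      refine (stepA_perm rest _ _ _ _ ?_).trans (ih _ _ _ _)
      have e1 : (pvProd xs ys).map (fun p => (p.1, h - p.2 - 1)) = pvProd xs (ys.map (fun t => h - t - 1)) := pvProd_map_snd xs ys (fun t => h - t - 1)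
      have e2 : (pvProd xs ys).map (fun p => (p.1, h + p.2)) = pvProd xs (ys.map (fun t => h + t)) := pvProd_map_snd xs ys (fun t => h + t)
      rw [e1, e2]
      exact (pvProd_append_right_perm _ _ _).symm
    · by_cases hB : f = "B"
      · simp only [hB]
        refine (stepA_perm rest _ _ _ _ ?_).trans (ih _ _ _ _)
        have e1 : (pvProd xs ys).map (fun p => (p.1, 2 * h - p.2 - 1)) = pvProd xs (ys.map (fun t => 2 * h - t - 1)) := pvProd_map_snd xs ys (fun t => 2 * h - t - 1)
        have hsc : pvProd xs ys ++ (pvProd xs ys).map (fun p => (p.1, 2 * h - p.2 - 1)) = pvProd xs ys ++ pvProd xs (ys.map (fun t => 2 * h - t - 1)) := by rw [e1]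
        rw [hsc]
        exact (pvProd_append_right_perm _ _ _).symm
      · by_cases hL : f = "L"
        · simp only [hL]
          have e1 : (pvProd xs ys).map (fun p => (w - p.1 - 1, p.2)) = pvProd (xs.map (fun t => w - t - 1)) ys := pvProd_map_fst xs ys (fun t => w - t - 1)
          have e2 : (pvProd xs ys).map (fun p => (w + p.1, p.2)) = pvProd (xs.map (fun t => w + t)) ys := pvProd_map_fst xs ys (fun t => w + t)
          rw [e1, e2, ← pvProd_append_left]
          exact ih _ _ _ _
        · by_cases hR : f = "R"
          · simp only [hR]
            have e1 : (pvProd xs ys).map (fun p => (2 * w - p.1 - 1, p.2)) = pvProd (xs.map (fun t => 2 * w - t - 1)) ys := pvProd_map_fst xs ys (fun t => 2 * w - t - 1)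
            have hsc : pvProd xs ys ++ (pvProd xs ys).map (fun p => (2 * w - p.1 - 1, p.2)) = pvProd xs ys ++ pvProd (xs.map (fun t => 2 * w - t - 1)) ys := by rw [e1]
            rw [hsc, ← pvProd_append_left]
            exact ih _ _ _ _
          · simp only [if_neg hT, if_neg hB, if_neg hL, if_neg hR]
            exact ih _ _ _ _

theorem stepA_nil (folds : List String) : ∀ (w h : Int),
    (folds.foldl foldStepA (w, h, ([] : List (Int × Int)))).2.2 = [] := by
  induction folds with
  | nil => intro w h; rfl
  | cons f rest ih =>
    intro w h
    simp only [List.foldl_cons, foldStepA]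
    split_ifs <;> exact ih _ _

-- the concrete 1-D loop is the symbolic loop evaluated at the punch coordinates
theorem oneD_eval (folds : List String) (x y : Int) : ∀ (sx : List (Int × Int)) (ws : Int) (sy : List (Int × Int)) (hs : Int),
    folds.foldl oneDStep (sx.map (evalS x), ws, sy.map (evalS y), hs)
      = ((folds.foldl foldStepB (sx, ws, sy, hs)).1.map (evalS x),
         (folds.foldl foldStepB (sx, ws, sy, hs)).2.1,
         (folds.foldl foldStepB (sx, ws, sy, hs)).2.2.1.map (evalS y),
         (folds.foldl foldStepB (sx, ws, sy, hs)).2.2.2) := by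
  induction folds with
  | nil => intro sx ws sy hs; rfl
  | cons f rest ih =>
    intro sx ws sy hs
    simp only [List.foldl_cons, oneDStep, foldStepB]
    by_cases hL : f = "L"
    · simp only [hL]
      have e1 : (sx.map (evalS x)).map (fun t => ws - t - 1) = (sx.map (fun p => (-p.1, ws - p.2 - 1))).map (evalS x) := by
        simp only [List.map_map]; refine List.map_congr_left ?_; intro p _; simp [evalS, Function.comp]; ring
      have e2 : (sx.map (evalS x)).map (fun t => ws + t) = (sx.map (fun p => (p.1, ws + p.2))).map (evalS x) := by
        simp only [List.map_map]; refine List.map_congr_left ?_; intro p _; simp [evalS, Function.comp]; ring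
      rw [e1, e2, ← List.map_append]
      exact ih _ _ _ _
    · by_cases hR : f = "R"
      · simp only [hR]
        have e1 : (sx.map (evalS x)).map (fun t => 2 * ws - t - 1) = (sx.map (fun p => (-p.1, 2 * ws - p.2 - 1))).map (evalS x) := by
          simp only [List.map_map]; refine List.map_congr_left ?_; intro p _; simp [evalS, Function.comp]; ring
        rw [e1, ← List.map_append]
        exact ih _ _ _ _
      · by_cases hT : f = "T"
        · simp only [hT]
          have e1 : (sy.map (evalS y)).map (fun t => hs - t - 1) = (sy.map (fun p => (-p.1, hs - p.2 - 1))).map (evalS y) := by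
            simp only [List.map_map]; refine List.map_congr_left ?_; intro p _; simp [evalS, Function.comp]; ring
          have e2 : (sy.map (evalS y)).map (fun t => hs + t) = (sy.map (fun p => (p.1, hs + p.2))).map (evalS y) := by
            simp only [List.map_map]; refine List.map_congr_left ?_; intro p _; simp [evalS, Function.comp]; ring
          rw [e1, e2, ← List.map_append]
          exact ih _ _ _ _
        · by_cases hB : f = "B"
          · simp only [hB]
            have e1 : (sy.map (evalS y)).map (fun t => 2 * hs - t - 1) = (sy.map (fun p => (-p.1, 2 * hs - p.2 - 1))).map (evalS y) := by
              simp only [List.map_map]; refine List.map_congr_left ?_; intro p _; simp [evalS, Function.comp]; ring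
            rw [e1, ← List.map_append]
            exact ih _ _ _ _
          · simp only [if_neg hL, if_neg hR, if_neg hT, if_neg hB]
            exact ih _ _ _ _

-- B's contribution of one punch, written through the concrete 1-D loop
theorem expand_eval (folds : List String) (w h x y : Int) :
    (folds.foldl foldStepB ([(1, 0)], w, [(1, 0)], h)).1.flatMap
        (fun a => (folds.foldl foldStepB ([(1, 0)], w, [(1, 0)], h)).2.2.1.map
          (fun b => (a.1 * x + a.2, b.1 * y + b.2)))
      = pvProd (folds.foldl oneDStep ([x], w, [y], h)).1 (folds.foldl oneDStep ([x], w, [y], h)).2.2.1 := by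
  have hx : ([x] : List Int) = ([(1, 0)] : List (Int × Int)).map (evalS x) := by simp [evalS]
  have hy : ([y] : List Int) = ([(1, 0)] : List (Int × Int)).map (evalS y) := by simp [evalS]
  rw [hx, hy, oneD_eval folds x y [(1, 0)] w [(1, 0)] h]
  simp [pvProd, List.flatMap_map, List.map_map, Function.comp_def, evalS]

-- A's final point list is a permutation of B's collected point list
theorem solveA_list_perm (folds : List String) (w h : Int) : ∀ (P : List (Int × Int)),
    ((folds.foldl foldStepA (w, h, P)).2.2).Perm
      (P.flatMap (fun q => (folds.foldl foldStepB ([(1, 0)], w, [(1, 0)], h)).1.flatMap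
        (fun a => (folds.foldl foldStepB ([(1, 0)], w, [(1, 0)], h)).2.2.1.map
          (fun b => (a.1 * q.1 + a.2, b.1 * q.2 + b.2))))) := by
  intro P
  induction P with
  | nil => simp [stepA_nil]
  | cons p P ih =>
    have h1 : (p :: P) = [p] ++ P := rfl
    rw [h1, List.flatMap_append]
    refine (stepA_append_perm folds w h [p] P).trans ?_
    refine List.Perm.append ?_ ih
    have h2 : ([p] : List (Int × Int)) = pvProd [p.1] [p.2] := by simp [pvProd]
    rw [List.flatMap_singleton, h2]
    refine (stepA_prod folds [p.1] w [p.2] h).trans ?_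
    rw [← expand_eval folds w h p.1 p.2]
-- Python sorting of int pairs is sorting by the lexicographic order
theorem sorted2_fst_snd (xs : List (Int × Int)) :
    PySem.List.sorted2 xs Prod.fst Prod.snd false = PySem.List.sorted xs (fun p => toLex p) false := by
  rw [PySem.List.sorted_eq_foldl_insertBy]
  show List.foldl (fun acc x => PySem.List.insertBy _ x acc) [] xs = _
  have hfn : (fun (a b : Int × Int) => decide (a.1 < b.1) || (!decide (b.1 < a.1) && decide (a.2 < b.2)))
      = (fun (a b : Int × Int) => decide (toLex a < toLex b)) := by
    funext a b
    rcases lt_trichotomy a.1 b.1 with h | h | h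
    · simp [Prod.Lex.lt_iff, h, not_lt.2 (le_of_lt h)]
    · simp [Prod.Lex.lt_iff, h]
    · simp [Prod.Lex.lt_iff, h, ne_of_gt h, not_lt_of_gt h]
  simp only [Bool.false_eq_true, if_false]
  rw [hfn]

theorem sorted2_eq_of_perm {xs ys : List (Int × Int)} (hp : xs.Perm ys) :
    PySem.List.sorted2 xs Prod.fst Prod.snd false = PySem.List.sorted2 ys Prod.fst Prod.snd false := by
  rw [sorted2_fst_snd, sorted2_fst_snd]
  exact PySem.List.sorted_eq_sorted_of_perm xs ys (fun p => toLex p) (toLex.injective) hp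

-- ===== VERDICT (by name: the statement is the Claim_ definition above) =====
theorem solve_spec : Claim_equal_solve := by
  intro w h_ folds punches _
  show solve w h_ folds punches = solve_alt w h_ folds punches
  have hperm := sorted2_eq_of_perm (solveA_list_perm folds w h_ punches)
  simp only [solve, solve_alt, hperm]
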